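-- pv_equiv track=rewrite | github.com/bzm3r/numba-ncc | core/utilities.py | determine_relevant_table_points
-- ===== SOURCE A (Python) =====
-- def is_ascending(num_elements, test_list):
--     for n in range(num_elements - 1):
--         if test_list[n] > test_list[n + 1]:
--             return False
--
--     return True
--
-- def determine_relevant_table_points(x, labels, type="row"):
--     num_labels = len(labels)
--
--     if not (is_ascending(num_labels, labels)):
--         raise Exception("Labels are not ascending!")
--
--     lower_bound_index = None
--     for n in range(num_labels - 1):
--         if x > labels[n]:
--             lower_bound_index = n
--             break
--
--     upper_bound_index = None
--     if lower_bound_index != None: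
--         for n in range(lower_bound_index + 1, num_labels):
--             if x < labels[n]:
--                 upper_bound_index = n
--                 break
--     else:
--         for n in range(num_labels):
--             if x < labels[n]:
--                 upper_bound_index = n
--                 break
--
--     if lower_bound_index == None and upper_bound_index != None:
--         return upper_bound_index, lower_bound_index
--     else:
--         return lower_bound_index, upper_bound_index
-- ===== SOURCE B (Python) =====
-- def determine_relevant_table_points(x, labels, type="row"):
--     if any(a > b for a, b in zip(labels, labels[1:])):
--         raise Exception("Labels are not ascending!")
--     n = len(labels)
--     # In an ascending list, the only index that can strictly lower-bound x is 0.
--     lower = 0 if n >= 2 and x > labels[0] else None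
--     # Binary search for the first index whose label exceeds x (bisect_right).
--     lo, hi = 0, n
--     while lo < hi:
--         mid = (lo + hi) // 2
--         if labels[mid] <= x:
--             lo = mid + 1
--         else:
--             hi = mid
--     upper = lo if lo < n else None
--     if lower is None and upper is not None:
--         return upper, lower
--     return lower, upper
-- ===== Notes on version B (the rewrite author's own statement) =====
-- stated objective: alternative
-- what changed: Replaces A's three linear index scans by a pairwise-zip ascending check, a closed-form lower bound (in an ascending list only index 0 can strictly lower-bound x) and a hand-written binary search for the upper bound; Pre_ excludes non-ascending label lists, on which A raises Exception (B raises the same).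
import Mathlib
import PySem

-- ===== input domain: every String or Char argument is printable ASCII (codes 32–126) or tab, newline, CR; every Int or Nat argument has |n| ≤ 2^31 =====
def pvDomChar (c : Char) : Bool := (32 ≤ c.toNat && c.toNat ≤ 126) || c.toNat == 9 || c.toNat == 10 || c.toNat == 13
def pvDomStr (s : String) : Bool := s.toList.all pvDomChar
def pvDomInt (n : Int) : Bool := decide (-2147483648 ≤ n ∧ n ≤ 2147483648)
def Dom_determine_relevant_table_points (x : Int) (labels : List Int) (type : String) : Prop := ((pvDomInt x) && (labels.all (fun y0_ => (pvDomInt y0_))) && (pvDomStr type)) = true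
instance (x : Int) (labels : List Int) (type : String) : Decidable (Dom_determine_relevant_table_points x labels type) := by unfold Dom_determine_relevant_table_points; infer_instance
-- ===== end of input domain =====

-- One honest line: B checks ascending via adjacent zip pairs, derives the lower index in
-- closed form and the upper index by binary search, instead of A's three linear index scans.

-- ===== PORT A =====
-- for n in range(num_elements-1): if test_list[n] > test_list[n+1]: return False
def is_ascending_go (test_list : List Int) : List Int → Bool
  | [] => true
  | n :: ns =>
      if PySem.List.pyGetD test_list n 0 > PySem.List.pyGetD test_list (n + 1) 0 then false
      else is_ascending_go test_list ns

def is_ascending (num_elements : Int) (test_list : List Int) : Bool :=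
  is_ascending_go test_list (PySem.List.pyRange 0 (num_elements - 1) 1)

-- for n in rng: if x > labels[n]: return n  (A's lower-bound loop)
def findGt_go (x : Int) (labels : List Int) : List Int → Option Int
  | [] => none
  | n :: ns => if x > PySem.List.pyGetD labels n 0 then some n else findGt_go x labels ns

-- for n in rng: if x < labels[n]: return n  (A's upper-bound loops)
def findLt_go (x : Int) (labels : List Int) : List Int → Option Int
  | [] => none
  | n :: ns => if x < PySem.List.pyGetD labels n 0 then some n else findLt_go x labels ns

def determine_relevant_table_points (x : Int) (labels : List Int) (type : String) : Option Int × Option Int :=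
  let num_labels : Int := labels.length
  if ¬ is_ascending num_labels labels then (none, none)  -- Python raises Exception here; outside Pre_
  else
    let lower_bound_index := findGt_go x labels (PySem.List.pyRange 0 (num_labels - 1) 1)
    let upper_bound_index :=
      match lower_bound_index with
      | some l => findLt_go x labels (PySem.List.pyRange (l + 1) num_labels 1)
      | none => findLt_go x labels (PySem.List.pyRange 0 num_labels 1)
    match lower_bound_index, upper_bound_index with
    | none, some u => (some u, none)
    | lo, up => (lo, up)

-- ===== PORT B =====
-- while lo < hi: mid = (lo+hi)//2; if labels[mid] <= x: lo = mid+1 else: hi = mid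
def bsearch_gt (x : Int) (labels : List Int) (lo hi : Int) : Int :=
  if h : lo < hi then
    let mid := PySem.Int.floordiv (lo + hi) 2
    if PySem.List.pyGetD labels mid 0 ≤ x then bsearch_gt x labels (mid + 1) hi
    else bsearch_gt x labels lo mid
  else lo
termination_by (hi - lo).toNat
decreasing_by
  · have := PySem.Int.floordiv_two_mid_bounds (lo := lo) (hi := hi) (le_of_lt h)
    omega
  · have h1 := PySem.Int.floordiv_two_mid_bounds (lo := lo) (hi := hi) (le_of_lt h)
    have h2 : PySem.Int.floordiv (lo + hi) 2 < hi :=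
      (PySem.Int.floordiv_lt_iff_lt_mul (by omega)).mpr (by omega)
    omega

def determine_relevant_table_points_alt (x : Int) (labels : List Int) (type : String) : Option Int × Option Int :=
  if (labels.zip labels.tail).any (fun p => p.1 > p.2) then (none, none)  -- Python raises here; outside Pre_
  else
    let n : Int := labels.length
    let lower : Option Int :=
      if 2 ≤ n ∧ x > PySem.List.pyGetD labels 0 0 then some 0 else none
    let k := bsearch_gt x labels 0 n
    let upper : Option Int := if k < n then some k else none
    if lower = none ∧ upper ≠ none then (upper, lower) else (lower, upper)

-- ===== PRECONDITION & SPEC =====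
-- Pre_ excludes exactly the non-ascending label lists, on which Python A raises Exception.
def Pre_determine_relevant_table_points (x : Int) (labels : List Int) (type : String) : Prop :=
  labels.IsChain (· ≤ ·)
instance (x : Int) (labels : List Int) (type : String) : Decidable (Pre_determine_relevant_table_points x labels type) := by unfold Pre_determine_relevant_table_points; infer_instance

def pvWitness_determine_relevant_table_points : Int × List Int × String := (5, [1, 4, 9], "row")

def Spec_determine_relevant_table_points (x : Int) (labels : List Int) (type : String) (out : Option Int × Option Int) : Prop := out = determine_relevant_table_points_alt x labels type
instance (x : Int) (labels : List Int) (type : String) (out : Option Int × Option Int) : Decidable (Spec_determine_relevant_table_points x labels type out) := by unfold Spec_determine_relevant_table_points; infer_instance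

-- ===== CLAIM (what is proved, stated in full; the proofs are below) =====
def Claim_equal_determine_relevant_table_points : Prop := ∀ (x : Int) (labels : List Int) (type : String), Dom_determine_relevant_table_points x labels type → Pre_determine_relevant_table_points x labels type → Spec_determine_relevant_table_points x labels type (determine_relevant_table_points x labels type)

-- ===== LEMMAS AND PROOFS =====

theorem mono_pyGetD (labels : List Int) (h : labels.IsChain (· ≤ ·))
    (i j : Int) (hi : 0 ≤ i) (hij : i ≤ j) (hj : j < (labels.length : Int)) :
    PySem.List.pyGetD labels i 0 ≤ PySem.List.pyGetD labels j 0 := by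
  have hp : labels.Pairwise (· ≤ ·) := List.isChain_iff_pairwise.mp h
  rw [PySem.List.pyGetD_eq_getElem _ _ hi (by omega),
      PySem.List.pyGetD_eq_getElem _ _ (by omega) hj]
  rcases eq_or_lt_of_le hij with he | hlt
  · subst he; exact le_refl _
  · exact List.pairwise_iff_getElem.mp hp i.toNat j.toNat (by omega) (by omega) (by omega)

theorem findGt_go_none (x : Int) (labels : List Int) (ls : List Int)
    (h : ∀ n ∈ ls, ¬ x > PySem.List.pyGetD labels n 0) :
    findGt_go x labels ls = none := by
  induction ls with
  | nil => rfl
  | cons n ns ih =>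
    simp only [findGt_go]
    rw [if_neg (h n (by simp))]
    exact ih (fun m hm => h m (by simp [hm]))

theorem findLt_range (x : Int) (labels : List Int) (k : Int)
    (hk0 : 0 ≤ k) (hklen : k ≤ (labels.length : Int))
    (hPlo : ∀ i : Int, 0 ≤ i → i < k → PySem.List.pyGetD labels i 0 ≤ x)
    (hPk : k < (labels.length : Int) → x < PySem.List.pyGetD labels k 0) :
    ∀ (fuel : Nat) (s : Int), (k - s).toNat ≤ fuel → 0 ≤ s → s ≤ k →
      findLt_go x labels (PySem.List.pyRange s (labels.length : Int)) =
        if k < (labels.length : Int) then some k else none := by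
  intro fuel
  induction fuel with
  | zero =>
    intro s hf hs0 hsk
    have hsk' : s = k := by omega
    subst hsk'
    by_cases hkl : s < (labels.length : Int)
    · rw [PySem.List.pyRange_one_cons hkl]
      simp only [findLt_go]
      rw [if_pos (hPk hkl), if_pos hkl]
    · rw [PySem.List.pyRange_one_eq_nil (by omega), if_neg hkl]; rfl
  | succ m ih =>
    intro s hf hs0 hsk
    rcases eq_or_lt_of_le hsk with he | hlt
    · subst he
      by_cases hkl : s < (labels.length : Int)
      · rw [PySem.List.pyRange_one_cons hkl]
        simp only [findLt_go]
        rw [if_pos (hPk hkl), if_pos hkl]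
      · rw [PySem.List.pyRange_one_eq_nil (by omega), if_neg hkl]; rfl
    · rw [PySem.List.pyRange_one_cons (by omega)]
      simp only [findLt_go]
      rw [if_neg (by exact not_lt.mpr (hPlo s hs0 hlt)), ih (s + 1) (by omega) (by omega) (by omega)]

theorem bsearch_spec (x : Int) (labels : List Int) (hch : labels.IsChain (· ≤ ·)) :
    ∀ (fuel : Nat) (lo hi : Int), (hi - lo).toNat ≤ fuel →
      0 ≤ lo → lo ≤ hi → hi ≤ (labels.length : Int) →
      (∀ i : Int, 0 ≤ i → i < lo → PySem.List.pyGetD labels i 0 ≤ x) →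
      (∀ i : Int, hi ≤ i → i < (labels.length : Int) → x < PySem.List.pyGetD labels i 0) →
      (0 ≤ bsearch_gt x labels lo hi ∧ bsearch_gt x labels lo hi ≤ (labels.length : Int)) ∧
      (∀ i : Int, 0 ≤ i → i < bsearch_gt x labels lo hi → PySem.List.pyGetD labels i 0 ≤ x) ∧
      (∀ i : Int, bsearch_gt x labels lo hi ≤ i → i < (labels.length : Int) →
        x < PySem.List.pyGetD labels i 0) := by
  intro fuel
  induction fuel with
  | zero =>
    intro lo hi hf h0 hlh hhl hPlo hPhi
    have : lo = hi := by omega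
    subst this
    rw [bsearch_gt, dif_neg (by omega)]
    exact ⟨⟨h0, hhl⟩, hPlo, hPhi⟩
  | succ m ih =>
    intro lo hi hf h0 hlh hhl hPlo hPhi
    rw [bsearch_gt]
    by_cases hlt : lo < hi
    · rw [dif_pos hlt]
      have hmid := PySem.Int.floordiv_two_mid_bounds (lo := lo) (hi := hi) (le_of_lt hlt)
      have hmid2 : PySem.Int.floordiv (lo + hi) 2 < hi :=
        (PySem.Int.floordiv_lt_iff_lt_mul (by omega)).mpr (by omega)
      set mid := PySem.Int.floordiv (lo + hi) 2 with hmiddef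
      by_cases hc : PySem.List.pyGetD labels mid 0 ≤ x
      · rw [if_pos hc]
        refine ih (mid + 1) hi (by omega) (by omega) (by omega) hhl ?_ hPhi
        intro i hi0 hilt
        by_cases him : i < lo
        · exact hPlo i hi0 him
        · calc PySem.List.pyGetD labels i 0 ≤ PySem.List.pyGetD labels mid 0 :=
                 mono_pyGetD labels hch i mid hi0 (by omega) (by omega)
            _ ≤ x := hc
      · rw [if_neg hc]
        refine ih lo mid (by omega) h0 (by omega) (by omega) hPlo ?_
        intro i hmi hil
        calc x < PySem.List.pyGetD labels mid 0 := by omega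
          _ ≤ PySem.List.pyGetD labels i 0 := mono_pyGetD labels hch mid i (by omega) hmi hil
    · rw [dif_neg hlt]
      have : lo = hi := by omega
      exact ⟨⟨h0, by omega⟩, hPlo, by omega ▸ hPhi⟩

theorem is_ascending_go_true (labels : List Int) (ls : List Int)
    (h : ∀ n ∈ ls, ¬ PySem.List.pyGetD labels n 0 > PySem.List.pyGetD labels (n + 1) 0) :
    is_ascending_go labels ls = true := by
  induction ls with
  | nil => rfl
  | cons n ns ih =>
    simp only [is_ascending_go]
    rw [if_neg (h n (by simp))]
    exact ih (fun m hm => h m (by simp [hm]))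

theorem asc_A (labels : List Int) (hch : labels.IsChain (· ≤ ·)) :
    is_ascending_go labels (PySem.List.pyRange 0 ((labels.length : Int) - 1)) = true := by
  apply is_ascending_go_true
  intro n hn
  rw [PySem.List.mem_pyRange_one] at hn
  exact not_lt.mpr (mono_pyGetD labels hch n (n + 1) hn.1 (by omega) (by omega))

theorem asc_B (labels : List Int) (hch : labels.IsChain (· ≤ ·)) :
    (labels.zip labels.tail).any (fun p => p.1 > p.2) = false := by
  rw [List.any_eq_false]
  intro p hp
  obtain ⟨i, hi, hpe⟩ := List.mem_iff_getElem.mp hp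
  have hlen : i < labels.tail.length := by
    simp only [List.length_zip] at hi; omega
  have hlen2 : i + 1 < labels.length := by
    simp only [List.length_tail] at hlen; omega
  have hleni : i < labels.length := by omega
  have : (labels.zip labels.tail)[i] = (labels[i], labels[i + 1]) := by
    rw [List.getElem_zip]; rw [List.getElem_tail]
  rw [this] at hpe
  have hp' : labels.Pairwise (· ≤ ·) := List.isChain_iff_pairwise.mp hch
  have hle : labels[i] ≤ labels[i + 1] :=
    List.pairwise_iff_getElem.mp hp' i (i + 1) hleni hlen2 (by omega)
  subst hpe
  simp only [gt_iff_lt, decide_eq_true_eq, not_lt]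
  exact hle

theorem lower_eq (x : Int) (labels : List Int) (hch : labels.IsChain (· ≤ ·)) :
    findGt_go x labels (PySem.List.pyRange 0 ((labels.length : Int) - 1)) =
      if 2 ≤ (labels.length : Int) ∧ x > PySem.List.pyGetD labels 0 0 then some 0 else none := by
  by_cases h2 : 2 ≤ (labels.length : Int)
  · rw [PySem.List.pyRange_one_cons (by omega)]
    simp only [findGt_go]
    by_cases hx : x > PySem.List.pyGetD labels 0 0
    · rw [if_pos hx, if_pos ⟨h2, hx⟩]
    · rw [if_neg hx, if_neg (by tauto)]
      apply findGt_go_none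
      intro n hn
      rw [PySem.List.mem_pyRange_one] at hn
      have := mono_pyGetD labels hch 0 n (by omega) (by omega) (by omega)
      omega
  · rw [PySem.List.pyRange_one_eq_nil (by omega), if_neg (by tauto)]
    rfl

-- ===== VERDICT (by name: the statement is the Claim_ definition above) =====
theorem determine_relevant_table_points_spec : Claim_equal_determine_relevant_table_points := by
  intro x labels type _ hPre
  have hch : labels.IsChain (· ≤ ·) := hPre
  unfold Spec_determine_relevant_table_points
  unfold determine_relevant_table_points determine_relevant_table_points_alt is_ascending
  simp only [asc_A labels hch, asc_B labels hch, Bool.false_eq_true]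
  obtain ⟨⟨hk0, hklen⟩, hPlo, hPhi⟩ :=
    bsearch_spec x labels hch ((labels.length : Int) - 0).toNat 0 (labels.length : Int)
      (by omega) (by omega) (by omega) (by omega) (by omega) (by omega)
  set k := bsearch_gt x labels 0 (labels.length : Int) with hk
  rw [lower_eq x labels hch]
  by_cases hcond : 2 ≤ (labels.length : Int) ∧ x > PySem.List.pyGetD labels 0 0
  · rw [if_pos hcond]
    have hk1 : 1 ≤ k := by
      by_contra hlt
      have := hPhi 0 (by omega) (by omega)
      omega
    simp only []
    rw [findLt_range x labels k hk0 hklen hPlo (fun h => hPhi k (le_refl _) h)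
      k.toNat (0 + 1) (by omega) (by omega) (by omega)]
    simp
  · rw [if_neg hcond]
    simp only []
    rw [findLt_range x labels k hk0 hklen hPlo (fun h => hPhi k (le_refl _) h)
      k.toNat 0 (by omega) (by omega) (by omega)]
    by_cases hkl : k < (labels.length : Int) <;> simp [hkl]
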